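-- pv_equiv track=rewrite | github.com/dbabbitt/notebooks | py/notebook_utils.py | split_list_by_exclusion
-- ===== SOURCE A (Python) =====
-- def split_list_by_exclusion(splitting_indices_list, excluded_indices_list=[]):
--     """
--     Split a list of row indices into a list of lists, where each inner list
--     contains a contiguous sequence of indices that are not in the excluded indices list.
--
--     Parameters:
--         splitting_indices_list: A list of row indices to split.
--         excluded_indices_list: A list of row indices that should be considered excluded.
--                                Empty by default.
--
--     Returns:
--         A list of lists, where each inner list contains a contiguous sequence of indices that are not in the excluded indices.
--     """
--
--     # Initialize the output list
--     split_list = []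
--
--     # Initialize the current list
--     current_list = []
--
--     # Iterate over the splitting indices list
--     for current_idx in range(int(min(splitting_indices_list)), int(max(splitting_indices_list)) + 1):
--
--         # Check that the current index is in the splitting indices list and not in the excluded indices list
--         if (current_idx in splitting_indices_list) and (current_idx not in excluded_indices_list):
--
--             # Add it to the current list
--             current_list.append(current_idx)
--
--         # Otherwise, if the current list is not empty, add it to the split list and start a new current list
--         else:
--             if current_list: split_list.append(current_list)
--             current_list = []
--
--     # If the current list is not empty, add it to the split list
--     if current_list: split_list.append(current_list)
--
--     # Return the split list
--     return split_list
-- ===== SOURCE B (Python) =====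
-- def split_list_by_exclusion(splitting_indices_list, excluded_indices_list=[]):
--     # Pass 1: collect the valid integers of the index range, using sets for O(1) membership.
--     present = set(splitting_indices_list)
--     excluded = set(excluded_indices_list)
--     lo = int(min(splitting_indices_list))
--     hi = int(max(splitting_indices_list))
--     valid = [i for i in range(lo, hi + 1) if i in present and i not in excluded]
--     # Pass 2: group the flat valid list into contiguous runs by adjacency to the previous value.
--     runs = []
--     prev = None
--     for v in valid:
--         if prev is not None and prev == v - 1:
--             runs[-1].append(v)
--         else:
--             runs.append([v])
--         prev = v
--     return runs
-- ===== Notes on version B (the rewrite author's own statement) =====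
-- stated objective: faster
-- what changed: B replaces A's single range loop with inline current_list/flush state by two phases - a set-based filter of the range into a flat list of valid integers, then an adjacency-keyed grouping pass over that flat list - and the O(n) list membership tests inside the range loop become O(1) set lookups.
import Mathlib
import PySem

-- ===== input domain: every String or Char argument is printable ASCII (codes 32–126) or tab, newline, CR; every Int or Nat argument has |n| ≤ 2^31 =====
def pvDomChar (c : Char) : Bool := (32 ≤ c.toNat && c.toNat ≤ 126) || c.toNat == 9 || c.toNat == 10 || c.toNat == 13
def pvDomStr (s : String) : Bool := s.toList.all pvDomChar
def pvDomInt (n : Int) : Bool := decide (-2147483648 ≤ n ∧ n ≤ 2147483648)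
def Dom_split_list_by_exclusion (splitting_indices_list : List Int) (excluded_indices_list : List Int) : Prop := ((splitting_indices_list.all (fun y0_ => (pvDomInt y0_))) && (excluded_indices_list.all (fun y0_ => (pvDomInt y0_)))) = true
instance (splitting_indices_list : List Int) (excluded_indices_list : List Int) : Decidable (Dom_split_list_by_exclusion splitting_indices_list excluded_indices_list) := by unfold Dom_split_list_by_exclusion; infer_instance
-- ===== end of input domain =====

-- B filters the index range into a flat list of valid integers (set membership) and then groups
-- it into contiguous runs by adjacency, instead of A's inline current_list/flush loop; faster
-- membership mechanism (set vs list scan inside the range loop).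

-- ===== PORT A =====
def split_list_by_exclusion (splitting_indices_list : List Int) (excluded_indices_list : List Int) : List (List Int) :=
  let lo := ((PySem.List.min? splitting_indices_list (fun x => x)).getD 0)
  let hi := ((PySem.List.max? splitting_indices_list (fun x => x)).getD 0)
  let st := (PySem.List.pyRange lo (hi + 1) 1).foldl
    (fun (st : List (List Int) × List Int) current_idx =>
      if splitting_indices_list.contains current_idx && !(excluded_indices_list.contains current_idx) then
        (st.1, st.2 ++ [current_idx])
      else
        ((if st.2 ≠ [] then st.1 ++ [st.2] else st.1), []))
    ([], [])
  st.1 ++ (if st.2 ≠ [] then [st.2] else [])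

-- ===== PORT B =====
def split_list_by_exclusion_alt (splitting_indices_list : List Int) (excluded_indices_list : List Int) : List (List Int) :=
  let present : PySem.Set Int := PySem.Set.ofList splitting_indices_list
  let excluded : PySem.Set Int := PySem.Set.ofList excluded_indices_list
  let lo := ((PySem.List.min? splitting_indices_list (fun x => x)).getD 0)
  let hi := ((PySem.List.max? splitting_indices_list (fun x => x)).getD 0)
  let valid := (PySem.List.pyRange lo (hi + 1) 1).filter
    (fun i => PySem.Set.contains present i && !(PySem.Set.contains excluded i))
  let st := valid.foldl
    (fun (st : List (List Int) × Option Int) v =>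
      (match st.2 with
       | some p =>
         if p = v - 1 then (st.1.dropLast ++ [st.1.getLastD [] ++ [v]], some v)
         else (st.1 ++ [[v]], some v)
       | none => (st.1 ++ [[v]], some v)))
    ([], none)
  st.1

-- ===== PRECONDITION & SPEC =====
-- Pre_ excludes only the empty splitting list, on which Python's min()/max() raise ValueError.
def Pre_split_list_by_exclusion (splitting_indices_list : List Int) (excluded_indices_list : List Int) : Prop :=
  splitting_indices_list ≠ []
instance (splitting_indices_list : List Int) (excluded_indices_list : List Int) : Decidable (Pre_split_list_by_exclusion splitting_indices_list excluded_indices_list) := by unfold Pre_split_list_by_exclusion; infer_instance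
def pvWitness_split_list_by_exclusion : List Int × List Int := ([1, 2, 4, 5], [4])

def Spec_split_list_by_exclusion (splitting_indices_list : List Int) (excluded_indices_list : List Int) (out : List (List Int)) : Prop := out = split_list_by_exclusion_alt splitting_indices_list excluded_indices_list
instance (splitting_indices_list : List Int) (excluded_indices_list : List Int) (out : List (List Int)) : Decidable (Spec_split_list_by_exclusion splitting_indices_list excluded_indices_list out) := by unfold Spec_split_list_by_exclusion; infer_instance

-- ===== CLAIM (what is proved, stated in full; the proofs are below) =====
def Claim_equal_split_list_by_exclusion : Prop := ∀ (splitting_indices_list : List Int) (excluded_indices_list : List Int), Dom_split_list_by_exclusion splitting_indices_list excluded_indices_list → Pre_split_list_by_exclusion splitting_indices_list excluded_indices_list → Spec_split_list_by_exclusion splitting_indices_list excluded_indices_list (split_list_by_exclusion splitting_indices_list excluded_indices_list)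

-- ===== LEMMAS AND PROOFS =====

-- A's loop step and B's grouping step, named for the proofs.
def pvStepA (s e : List Int) (st : List (List Int) × List Int) (i : Int) : List (List Int) × List Int :=
  if s.contains i && !(e.contains i) then (st.1, st.2 ++ [i])
  else ((if st.2 ≠ [] then st.1 ++ [st.2] else st.1), [])

def pvStepB (st : List (List Int) × Option Int) (v : Int) : List (List Int) × Option Int :=
  match st.2 with
  | some p =>
    if p = v - 1 then (st.1.dropLast ++ [st.1.getLastD [] ++ [v]], some v)
    else (st.1 ++ [[v]], some v)
  | none => (st.1 ++ [[v]], some v)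

-- Coupling invariant for the two loops, and the main induction over the consecutive range.
theorem pv_loop_eq (s e : List Int) (f : Int → Bool)
    (hf : ∀ i, f i = (s.contains i && !(e.contains i))) :
    ∀ (n : Nat) (lo : Int) (acc : List (List Int)) (cur : List Int)
      (runs : List (List Int)) (prev : Option Int),
      runs = acc ++ (if cur = [] then [] else [cur]) →
      (if cur = [] then (∀ p, prev = some p → p < lo - 1) else prev = some (lo - 1)) →
      (let st := (PySem.List.pyRange lo (lo + n) 1).foldl (pvStepA s e) (acc, cur)
       st.1 ++ (if st.2 ≠ [] then [st.2] else []))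
      = (((PySem.List.pyRange lo (lo + n) 1).filter f).foldl pvStepB (runs, prev)).1 := by
  intro n
  induction n with
  | zero =>
    intro lo acc cur runs prev h1 _
    by_cases hc : cur = [] <;> simp [hc] at h1 ⊢ <;> simp [h1]
  | succ n ih =>
    intro lo acc cur runs prev h1 h2
    have hlt : lo < lo + (n + 1 : Nat) := by push_cast; omega
    rw [PySem.List.pyRange_one_cons hlt]
    have harr : lo + (n + 1 : Nat) = (lo + 1) + n := by push_cast; ring
    by_cases hv : f lo = true
    · -- lo is valid: A appends to cur, B starts or extends the last run
      rw [hf] at hv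
      simp only [List.filter_cons, hf, hv, if_true, List.foldl_cons]
      have hA : pvStepA s e (acc, cur) lo = (acc, cur ++ [lo]) := by
        simp only [pvStepA, hv]; simp
      by_cases hc : cur = []
      · -- cur empty: B opens a new run
        subst hc
        simp only [if_pos] at h2
        have hB : pvStepB (runs, prev) lo = (runs ++ [[lo]], some lo) := by
          cases prev with
          | none => simp [pvStepB]
          | some p =>
            have := h2 p rfl
            simp [pvStepB, show ¬ (p = lo - 1) by omega]
        rw [hA, hB, harr]
        apply ih (lo + 1) acc [lo] (runs ++ [[lo]]) (some lo)
        · simp at h1; simp [h1]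
        · simp
      · -- cur nonempty: B extends the last run
        simp only [if_neg hc] at h2
        have hruns : runs = acc ++ [cur] := by simpa [hc] using h1
        have hB : pvStepB (runs, prev) lo = (acc ++ [cur ++ [lo]], some lo) := by
          simp [pvStepB, h2, hruns]
        rw [hA, hB, harr]
        apply ih (lo + 1) acc (cur ++ [lo]) (acc ++ [cur ++ [lo]]) (some lo)
        · simp
        · simp
    · -- lo is invalid: A flushes cur, B skips
      rw [hf] at hv
      have hv' : (s.contains lo && !(e.contains lo)) = false := by
        cases h : (s.contains lo && !(e.contains lo)) with
        | false => rfl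
        | true => exact absurd h hv
      simp only [List.filter_cons, hf, hv', if_false, List.foldl_cons, Bool.false_eq_true]
      have hA : pvStepA s e (acc, cur) lo
          = ((if cur ≠ [] then acc ++ [cur] else acc), []) := by
        simp only [pvStepA, hv']; simp
      rw [hA, harr]
      apply ih (lo + 1) (if cur ≠ [] then acc ++ [cur] else acc) [] runs prev
      · by_cases hc : cur = [] <;> simp [hc] at h1 ⊢ <;> simp [h1]
      · intro p hp
        by_cases hc : cur = []
        · simp only [if_pos hc] at h2; have := h2 p hp; omega
        · simp only [if_neg hc] at h2; rw [h2] at hp; injection hp with h; omega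

-- ===== VERDICT (by name: the statement is the Claim_ definition above) =====
theorem split_list_by_exclusion_spec : Claim_equal_split_list_by_exclusion := by
  intro s e _ hpre
  unfold Spec_split_list_by_exclusion split_list_by_exclusion split_list_by_exclusion_alt
  simp only []
  set lo := ((PySem.List.min? s (fun x => x)).getD 0) with hlo
  set hi := ((PySem.List.max? s (fun x => x)).getD 0) with hhi
  have hle : lo ≤ hi + 1 := by
    cases s with
    | nil => exact absurd rfl hpre
    | cons a t =>
      have h1 := PySem.List.min?_id_cons (x := a) (t := t)
      have h2 := PySem.List.max?_id_cons (x := a) (t := t)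
      have hmin := PySem.List.min?_isMin h1 a (by simp)
      have hmax := PySem.List.max?_isMax h2 a (by simp)
      simp only [hlo, hhi, h1, h2, Option.getD_some] at *
      omega
  obtain ⟨n, hn⟩ : ∃ n : Nat, hi + 1 = lo + n := ⟨(hi + 1 - lo).toNat, by omega⟩
  rw [hn]
  exact pv_loop_eq s e _
    (by intro i
        rw [Bool.eq_iff_iff]
        simp [PySem.Set.contains, PySem.Set.mem_ofList]) n lo [] [] [] none
    (by simp) (by simp)
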